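-- pv_equiv track=rewrite | github.com/alsoba13/contests | adventofcode/2022/23/23.py | slv
-- ===== SOURCE A (Python) =====
-- from collections import defaultdict
--
-- def slv(elves, rounds):
--     turns = [[(-1,-1), (-1,0), (-1,1)], [(1,-1), (1,0), (1,1)], [(-1,-1), (0,-1), (1,-1)], [(-1,1), (0,1), (1,1)]]
--     nbs = [(-1,-1), (-1,0), (-1,1), (0,1), (1,1), (1,0), (1,-1), (0,-1)]
--     for round in range(rounds):
--         proposed = defaultdict(list)
--         unmoved = set()
--         for elf in elves:
--             if all((elf[0]+nb[0], elf[1]+nb[1]) not in elves for nb in nbs):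
--                 unmoved.add(elf)
--                 continue
--             moved = False
--             for direction in range(4):
--                 directions = turns[(round+direction)%4]
--                 if all([(elf[0]+dx, elf[1]+dy) not in elves for dx, dy in directions]):
--                     proposed[(elf[0]+directions[1][0], elf[1]+directions[1][1])].append(elf)
--                     moved = True
--                     break
--             if not moved: unmoved.add(elf)
--         if len(unmoved) == len(elves):
--             return round+1
--         elves = unmoved
--         for proposed_cell in proposed:
--             if len(proposed[proposed_cell]) == 1: elves.add(proposed_cell)
--             else:
--                 for elf in proposed[proposed_cell]: elves.add(elf)
--     return (1+max([elf[0] for elf in elves])-min([elf[0] for elf in elves])) * (1+max([elf[1] for elf in elves])-min([elf[1] for elf in elves])) - len(elves)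
-- ===== SOURCE B (Python) =====
-- def _propose(elves, r, elf):
--     x, y = elf
--     nw, n, ne = (x-1, y-1) in elves, (x-1, y) in elves, (x-1, y+1) in elves
--     w, e = (x, y-1) in elves, (x, y+1) in elves
--     sw, s, se = (x+1, y-1) in elves, (x+1, y) in elves, (x+1, y+1) in elves
--     if not (nw or n or ne or w or e or sw or s or se):
--         return None
--     clear = [not (nw or n or ne), not (sw or s or se), not (nw or w or sw), not (ne or e or se)]
--     deltas = [(-1, 0), (1, 0), (0, -1), (0, 1)]
--     for d in range(4):
--         k = (r + d) % 4
--         if clear[k]: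
--             dx, dy = deltas[k]
--             return (x + dx, y + dy)
--     return None
--
-- def slv(elves, rounds):
--     elves = set(elves)
--     for r in range(rounds):
--         props = [(e, _propose(elves, r, e)) for e in elves]
--         if all(t is None for _, t in props):
--             return r + 1
--         # brute-force pairwise conflict detection: an elf moves iff no OTHER elf
--         # proposes the same cell; no target->proposers grouping, no counter.
--         elves = {e if t is None or any(e2 != e and t2 == t for e2, t2 in props) else t
--                  for e, t in props}
--     xs = [x for x, _ in elves]
--     ys = [y for _, y in elves]
--     return (1 + max(xs) - min(xs)) * (1 + max(ys) - min(ys)) - len(elves)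
-- ===== Notes on version B (the rewrite author's own statement) =====
-- stated objective: alternative
-- what changed: B resolves each round by a brute-force pairwise scan over the list of (elf, proposal) pairs -- an elf moves iff no other elf proposes the same cell -- with no target->proposers grouping dict at all, and detects the quiescent round as 'all proposals are None' instead of comparing set sizes; A groups proposers per target in a defaultdict and resolves per target cell.
import Mathlib
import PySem

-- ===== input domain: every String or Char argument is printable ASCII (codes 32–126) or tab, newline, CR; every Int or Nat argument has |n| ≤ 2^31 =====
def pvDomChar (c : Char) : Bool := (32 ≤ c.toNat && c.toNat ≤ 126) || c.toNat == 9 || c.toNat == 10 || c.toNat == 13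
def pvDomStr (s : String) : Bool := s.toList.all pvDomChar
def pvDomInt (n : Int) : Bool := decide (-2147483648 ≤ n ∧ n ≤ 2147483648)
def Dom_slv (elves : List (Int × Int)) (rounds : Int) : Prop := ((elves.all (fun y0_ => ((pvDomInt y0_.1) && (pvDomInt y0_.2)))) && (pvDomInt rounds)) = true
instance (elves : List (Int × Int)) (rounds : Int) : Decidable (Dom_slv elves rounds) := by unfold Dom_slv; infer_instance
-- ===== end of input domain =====

-- B resolves each round by a brute-force pairwise scan over the (elf, proposal) list — an elf
-- moves iff no other elf proposes the same cell — with no target→proposers dict; an alternative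
-- decomposition, not claimed faster.

-- ===== PORT A =====
def pvTurns : List (List (Int × Int)) :=
  [[(-1,-1),(-1,0),(-1,1)], [(1,-1),(1,0),(1,1)], [(-1,-1),(0,-1),(1,-1)], [(-1,1),(0,1),(1,1)]]
def pvNbs : List (Int × Int) := [(-1,-1),(-1,0),(-1,1),(0,1),(1,1),(1,0),(1,-1),(0,-1)]

def pvAIso (elves : List (Int × Int)) (elf : Int × Int) : Bool :=
  pvNbs.all (fun nb => !(elves.contains (elf.1 + nb.1, elf.2 + nb.2)))

def pvATry (elves : List (Int × Int)) (round : Int) (elf : Int × Int) : List Int → Option (Int × Int)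
  | [] => none
  | d :: ds =>
    let dirs := pvTurns.getD (PySem.Int.mod (round + d) 4).toNat []
    if dirs.all (fun p => !(elves.contains (elf.1 + p.1, elf.2 + p.2))) then
      let mid := dirs.getD 1 (0, 0)
      some (elf.1 + mid.1, elf.2 + mid.2)
    else pvATry elves round elf ds

def pvARound (elves : List (Int × Int)) (round : Int) :
    PySem.Dict (Int × Int) (List (Int × Int)) × PySem.Set (Int × Int) :=
  elves.foldl (fun st elf =>
    if pvAIso elves elf then (st.1, PySem.Set.add st.2 elf)
    else
      match pvATry elves round elf (PySem.List.pyRange 0 4 1) with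
      | some t => (st.1.modify t [] (· ++ [elf]), st.2)
      | none => (st.1, PySem.Set.add st.2 elf))
    (PySem.Dict.empty, PySem.Set.empty)

def pvALoop (elves : List (Int × Int)) (round : Int) (fuel : Nat) : Int :=
  match fuel with
  | 0 =>
    (1 + (PySem.List.max? (elves.map (fun e => e.1)) (fun v => v)).getD 0
       - (PySem.List.min? (elves.map (fun e => e.1)) (fun v => v)).getD 0) *
    (1 + (PySem.List.max? (elves.map (fun e => e.2)) (fun v => v)).getD 0
       - (PySem.List.min? (elves.map (fun e => e.2)) (fun v => v)).getD 0) - elves.length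
  | fuel + 1 =>
    let st := pvARound elves round
    if PySem.Set.len st.2 == elves.length then round + 1
    else
      let elves' := st.1.keys.foldl (fun s c =>
          let ps := st.1.getD c []
          if ps.length == 1 then PySem.Set.add s c
          else ps.foldl (fun s e => PySem.Set.add s e) s) st.2
      pvALoop elves' (round + 1) fuel

def slv (elves : List (Int × Int)) (rounds : Int) : Int := pvALoop elves 0 rounds.toNat

-- ===== PORT B =====
def pvBScan (x y : Int) (clear : List Bool) (deltas : List (Int × Int)) (r : Int) :
    List Int → Option (Int × Int)
  | [] => none
  | d :: ds =>
    let k := (PySem.Int.mod (r + d) 4).toNat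
    if clear.getD k false then
      let dd := deltas.getD k (0, 0)
      some (x + dd.1, y + dd.2)
    else pvBScan x y clear deltas r ds

def pvBPropose (elves : List (Int × Int)) (r : Int) (elf : Int × Int) : Option (Int × Int) :=
  let x := elf.1
  let y := elf.2
  let nw := elves.contains (x - 1, y - 1)
  let n  := elves.contains (x - 1, y)
  let ne := elves.contains (x - 1, y + 1)
  let w  := elves.contains (x, y - 1)
  let e  := elves.contains (x, y + 1)
  let sw := elves.contains (x + 1, y - 1)
  let s  := elves.contains (x + 1, y)
  let se := elves.contains (x + 1, y + 1)
  if !(nw || n || ne || w || e || sw || s || se) then none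
  else
    let clear := [!(nw || n || ne), !(sw || s || se), !(nw || w || sw), !(ne || e || se)]
    let deltas : List (Int × Int) := [(-1,0),(1,0),(0,-1),(0,1)]
    pvBScan x y clear deltas r (PySem.List.pyRange 0 4 1)

-- the per-pair expression of Source B's set comprehension: elf stays unless it proposed and no other elf proposed the same cell
def pvBChoice (props : List ((Int × Int) × Option (Int × Int))) (p : (Int × Int) × Option (Int × Int)) : Int × Int :=
  match p.2 with
  | none => p.1
  | some t => if props.any (fun q => q.1 != p.1 && q.2 == some t) then p.1 else t

def pvBLoop (elves : List (Int × Int)) (r : Int) (fuel : Nat) : Int :=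
  match fuel with
  | 0 =>
    let xs := elves.map (fun p => p.1)
    let ys := elves.map (fun p => p.2)
    (1 + (PySem.List.max? xs (fun v => v)).getD 0 - (PySem.List.min? xs (fun v => v)).getD 0) *
    (1 + (PySem.List.max? ys (fun v => v)).getD 0 - (PySem.List.min? ys (fun v => v)).getD 0)
      - elves.length
  | fuel + 1 =>
    let props := elves.map (fun e => (e, pvBPropose elves r e))
    if props.all (fun p => p.2.isNone) then r + 1
    else
      pvBLoop (props.foldl (fun s p => PySem.Set.add s (pvBChoice props p)) PySem.Set.empty)
        (r + 1) fuel

def slv_alt (elves : List (Int × Int)) (rounds : Int) : Int :=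
  pvBLoop (PySem.Set.ofList elves) 0 rounds.toNat

-- ===== PRECONDITION & SPEC =====
-- elves is a Python set, so its list carries distinct elements: Nodup only records that set
-- representation. Pre_ excludes ([], rounds ≤ 0), where A (and B) raise ValueError on max([]).
def Pre_slv (elves : List (Int × Int)) (rounds : Int) : Prop :=
  elves.Nodup ∧ (rounds ≤ 0 → elves ≠ [])
instance (elves : List (Int × Int)) (rounds : Int) : Decidable (Pre_slv elves rounds) := by
  unfold Pre_slv; infer_instance
def pvWitness_slv : (List (Int × Int)) × Int := ([(0,0),(1,0)], 3)

def Spec_slv (elves : List (Int × Int)) (rounds : Int) (out : Int) : Prop := out = slv_alt elves rounds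
instance (elves : List (Int × Int)) (rounds : Int) (out : Int) : Decidable (Spec_slv elves rounds out) := by unfold Spec_slv; infer_instance

-- ===== CLAIM (what is proved, stated in full; the proofs are below) =====
def Claim_equal_slv : Prop := ∀ (elves : List (Int × Int)) (rounds : Int), Dom_slv elves rounds → Pre_slv elves rounds → Spec_slv elves rounds (slv elves rounds)

-- ===== LEMMAS AND PROOFS =====

-- membership-only congruence
theorem pvContainsPerm {l1 l2 : List (Int × Int)} (h : l1.Perm l2) (a : Int × Int) :
    l1.contains a = l2.contains a := by
  have := h.mem_iff (a := a); simp [this]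

theorem pvBProposePerm {l1 l2 : List (Int × Int)} (h : l1.Perm l2) (r : Int) (e : Int × Int) :
    pvBPropose l1 r e = pvBPropose l2 r e := by
  simp only [pvBPropose, pvContainsPerm h]

-- A's per-elf outcome is B's propose (same board)
theorem pvPropEq (s : List (Int × Int)) (r : Int) (e : Int × Int) :
    (if pvAIso s e then none else pvATry s r e (PySem.List.pyRange 0 4 1)) = pvBPropose s r e := by
  obtain ⟨x, y⟩ := e
  have h4 : PySem.List.pyRange 0 4 1 = [0, 1, 2, 3] := by decide
  have hmod : ∀ d : Int, PySem.Int.mod d 4 = d % 4 :=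
    fun d => PySem.Int.mod_eq_emod_of_pos (by norm_num)
  have hiso : pvAIso s (x, y) =
      !(s.contains (x - 1, y - 1) || s.contains (x - 1, y) || s.contains (x - 1, y + 1) ||
        s.contains (x, y - 1) || s.contains (x, y + 1) ||
        s.contains (x + 1, y - 1) || s.contains (x + 1, y) || s.contains (x + 1, y + 1)) := by
    simp only [pvAIso, pvNbs, List.all_cons, List.all_nil, Bool.and_true]
    have e1 : x + (-1 : Int) = x - 1 := by ring
    have e3 : y + (-1 : Int) = y - 1 := by ring
    have e5 : y + (0 : Int) = y := by ring
    have e6 : x + (0 : Int) = x := by ring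
    rw [e1, e3, e5, e6]
    generalize s.contains (x - 1, y - 1) = b1
    generalize s.contains (x - 1, y) = b2
    generalize s.contains (x - 1, y + 1) = b3
    generalize s.contains (x, y + 1) = b4
    generalize s.contains (x + 1, y + 1) = b5
    generalize s.contains (x + 1, y) = b6
    generalize s.contains (x + 1, y - 1) = b7
    generalize s.contains (x, y - 1) = b8
    revert b1 b2 b3 b4 b5 b6 b7 b8; decide
  have hm : r % 4 = 0 ∨ r % 4 = 1 ∨ r % 4 = 2 ∨ r % 4 = 3 := by omega
  rcases hm with hr | hr | hr | hr
  · have n0 : (PySem.Int.mod (r + 0) 4).toNat = 0 := by rw [hmod]; omega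
    have n1 : (PySem.Int.mod (r + 1) 4).toNat = 1 := by rw [hmod]; omega
    have n2 : (PySem.Int.mod (r + 2) 4).toNat = 2 := by rw [hmod]; omega
    have n3 : (PySem.Int.mod (r + 3) 4).toNat = 3 := by rw [hmod]; omega
    simp only [pvBPropose, pvBScan, pvATry, h4, hiso, n0, n1, n2, n3]
    norm_num [pvTurns, List.all_cons, List.all_nil, Bool.and_true, Bool.not_or, Bool.and_assoc,
      sub_eq_add_neg, add_zero, List.getD]
  · have n0 : (PySem.Int.mod (r + 0) 4).toNat = 1 := by rw [hmod]; omega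
    have n1 : (PySem.Int.mod (r + 1) 4).toNat = 2 := by rw [hmod]; omega
    have n2 : (PySem.Int.mod (r + 2) 4).toNat = 3 := by rw [hmod]; omega
    have n3 : (PySem.Int.mod (r + 3) 4).toNat = 0 := by rw [hmod]; omega
    simp only [pvBPropose, pvBScan, pvATry, h4, hiso, n0, n1, n2, n3]
    norm_num [pvTurns, List.all_cons, List.all_nil, Bool.and_true, Bool.not_or, Bool.and_assoc,
      sub_eq_add_neg, add_zero, List.getD]
  · have n0 : (PySem.Int.mod (r + 0) 4).toNat = 2 := by rw [hmod]; omega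
    have n1 : (PySem.Int.mod (r + 1) 4).toNat = 3 := by rw [hmod]; omega
    have n2 : (PySem.Int.mod (r + 2) 4).toNat = 0 := by rw [hmod]; omega
    have n3 : (PySem.Int.mod (r + 3) 4).toNat = 1 := by rw [hmod]; omega
    simp only [pvBPropose, pvBScan, pvATry, h4, hiso, n0, n1, n2, n3]
    norm_num [pvTurns, List.all_cons, List.all_nil, Bool.and_true, Bool.not_or, Bool.and_assoc,
      sub_eq_add_neg, add_zero, List.getD]
  · have n0 : (PySem.Int.mod (r + 0) 4).toNat = 3 := by rw [hmod]; omega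
    have n1 : (PySem.Int.mod (r + 1) 4).toNat = 0 := by rw [hmod]; omega
    have n2 : (PySem.Int.mod (r + 2) 4).toNat = 1 := by rw [hmod]; omega
    have n3 : (PySem.Int.mod (r + 3) 4).toNat = 2 := by rw [hmod]; omega
    simp only [pvBPropose, pvBScan, pvATry, h4, hiso, n0, n1, n2, n3]
    norm_num [pvTurns, List.all_cons, List.all_nil, Bool.and_true, Bool.not_or, Bool.and_assoc,
      sub_eq_add_neg, add_zero, List.getD]

-- total fold of adds keeps Nodup
theorem pvNodupFoldlAdd {β : Type} {l : List β} {u : List (Int × Int)}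
    (f : β → Int × Int) (hu : u.Nodup) :
    (l.foldl (fun s b => PySem.Set.add s (f b)) u).Nodup := by
  induction l generalizing u with
  | nil => exact hu
  | cons x t ih => exact ih (PySem.Set.nodup_add _ _ hu)

-- 'if p(e): s.add(e)' loop over fresh distinct elements is append-filter
theorem pvFoldlAddFilter (P : Int × Int → Bool) (l u : List (Int × Int))
    (hd : ∀ e ∈ l, e ∉ u) (hnd : l.Nodup) :
    l.foldl (fun s e => if P e then PySem.Set.add s e else s) u = u ++ l.filter P := by
  induction l generalizing u with
  | nil => simp
  | cons x t ih =>
    rcases List.nodup_cons.mp hnd with ⟨hx, hnd'⟩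
    by_cases hp : P x
    · rw [List.foldl_cons, if_pos hp, PySem.Set.add_of_not_mem (hd x (by simp))]
      rw [ih (u ++ [x]) (fun e he => by
            intro hmem
            rcases List.mem_append.mp hmem with h1 | h1
            · exact hd e (List.mem_cons_of_mem _ he) h1
            · rw [List.mem_singleton] at h1; subst h1; exact hx he) hnd']
      simp [hp]
    · rw [List.foldl_cons, if_neg hp,
          ih u (fun e he => hd e (List.mem_cons_of_mem _ he)) hnd']
      simp [hp]

-- pairs projection (A's dict keys)
theorem pvMapFstPairsT (s : List (Int × Int)) (P : Int × Int → Option (Int × Int)) :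
    (s.filterMap (fun e => (P e).map (fun t => (t, e)))).map Prod.fst = s.filterMap P := by
  rw [List.map_filterMap]
  apply List.filterMap_congr
  intro e _
  cases P e <;> simp

theorem pvPairsTFilter (s : List (Int × Int)) (P : Int × Int → Option (Int × Int)) (c : Int × Int) :
    (((s.filterMap (fun e => (P e).map (fun t => (t, e)))).filter
        (fun p => p.1 == c)).map (fun p => p.2))
      = s.filter (fun e => P e == some c) := by
  induction s with
  | nil => rfl
  | cons x t ih =>
    cases hx : P x
    · simp [hx, ih]
    · rename_i v
      by_cases hv : v = c <;>
        simp [hx, hv, ih, beq_iff_eq]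

-- splitting A's one-pass fold
theorem pvAGo (s : List (Int × Int)) (r : Int) (l : List (Int × Int))
    (d : PySem.Dict (Int × Int) (List (Int × Int))) (u : PySem.Set (Int × Int)) :
    l.foldl (fun st elf =>
        match pvBPropose s r elf with
        | some t => (st.1.modify t [] (· ++ [elf]), st.2)
        | none => (st.1, PySem.Set.add st.2 elf)) (d, u)
      = ((l.filterMap (fun e => (pvBPropose s r e).map (fun t => (t, e)))).foldl
            (fun d p => d.modify p.1 [] (· ++ [p.2])) d,
         l.foldl (fun u e => if (pvBPropose s r e).isNone then PySem.Set.add u e else u) u) := by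
  induction l generalizing d u with
  | nil => rfl
  | cons x t ih => cases hx : pvBPropose s r x <;> simp [hx, ih]

-- characterisation of A's round
theorem pvARoundEq (s : List (Int × Int)) (r : Int) (hnd : s.Nodup) :
    pvARound s r =
      ((s.filterMap (fun e => (pvBPropose s r e).map (fun t => (t, e)))).foldl
          (fun d p => d.modify p.1 [] (· ++ [p.2])) PySem.Dict.empty,
       s.filter (fun e => (pvBPropose s r e).isNone)) := by
  unfold pvARound
  have hstep : (fun (st : PySem.Dict (Int × Int) (List (Int × Int)) × PySem.Set (Int × Int)) elf =>
      if pvAIso s elf then (st.1, PySem.Set.add st.2 elf)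
      else
        match pvATry s r elf (PySem.List.pyRange 0 4 1) with
        | some t => (st.1.modify t [] (· ++ [elf]), st.2)
        | none => (st.1, PySem.Set.add st.2 elf))
      = (fun st elf =>
        match pvBPropose s r elf with
        | some t => (st.1.modify t [] (· ++ [elf]), st.2)
        | none => (st.1, PySem.Set.add st.2 elf)) := by
    funext st elf
    rw [← pvPropEq s r elf]
    by_cases hiso : pvAIso s elf
    · simp [hiso]
    · simp [hiso]
  rw [hstep, pvAGo]
  rw [pvFoldlAddFilter _ _ _ (by simp [PySem.Set.empty]) hnd]
  rfl

-- membership in A's resolution fold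
theorem pvMemResolve (keys : List (Int × Int)) (q : Int × Int → List (Int × Int))
    (u : List (Int × Int)) (c : Int × Int) :
    (c ∈ keys.foldl (fun s k =>
        if (q k).length == 1 then PySem.Set.add s k
        else (q k).foldl (fun s e => PySem.Set.add s e) s) u)
      ↔ c ∈ u ∨ ∃ k ∈ keys, (if (q k).length = 1 then c = k else c ∈ q k) := by
  induction keys generalizing u with
  | nil => simp
  | cons k ks ih =>
    rw [List.foldl_cons]
    by_cases h1 : (q k).length = 1
    · rw [if_pos (by simp [h1]), ih, PySem.Set.mem_add]
      simp only [List.mem_cons]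
      constructor
      · rintro ((hu | hck) | ⟨k', hk', hc⟩)
        · exact Or.inl hu
        · exact Or.inr ⟨k, Or.inl rfl, by simp [h1, hck]⟩
        · exact Or.inr ⟨k', Or.inr hk', hc⟩
      · rintro (hu | ⟨k', hk' | hk', hc⟩)
        · exact Or.inl (Or.inl hu)
        · subst hk'; simp [h1] at hc; exact Or.inl (Or.inr hc)
        · exact Or.inr ⟨k', hk', hc⟩
    · rw [if_neg (by simp [h1]), ih]
      have hmem : ∀ v : Int × Int,
          v ∈ (q k).foldl (fun s e => PySem.Set.add s e) u ↔ v ∈ u ∨ v ∈ q k := by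
        intro v
        rw [show (fun (s : PySem.Set (Int × Int)) e => PySem.Set.add s e)
              = (fun s e => PySem.Set.add s (id e)) from rfl, PySem.Set.mem_foldl_add]
        simp
      rw [hmem]
      simp only [List.mem_cons]
      constructor
      · rintro ((hu | hq) | ⟨k', hk', hc⟩)
        · exact Or.inl hu
        · exact Or.inr ⟨k, Or.inl rfl, by simp [h1, hq]⟩
        · exact Or.inr ⟨k', Or.inr hk', hc⟩
      · rintro (hu | ⟨k', hk' | hk', hc⟩)
        · exact Or.inl (Or.inl hu)
        · subst hk'; simp [h1] at hc; exact Or.inl (Or.inr hc)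
        · exact Or.inr ⟨k', hk', hc⟩

theorem pvNodupResolve (keys : List (Int × Int)) (q : Int × Int → List (Int × Int))
    (u : List (Int × Int)) (hu : u.Nodup) :
    (keys.foldl (fun s k =>
        if (q k).length == 1 then PySem.Set.add s k
        else (q k).foldl (fun s e => PySem.Set.add s e) s) u).Nodup := by
  induction keys generalizing u with
  | nil => exact hu
  | cons k ks ih =>
    rw [List.foldl_cons]
    by_cases h1 : ((q k).length == 1) = true
    · rw [if_pos h1]; exact ih _ (PySem.Set.nodup_add _ _ hu)
    · rw [if_neg h1]; exact ih _ (pvNodupFoldlAdd (fun e => e) hu)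

-- a Nodup list with all members equal to a present element is the singleton
theorem pvNodupAllEq {α : Type} (l : List α) (hnd : l.Nodup) (e : α) (he : e ∈ l)
    (hall : ∀ x ∈ l, x = e) : l = [e] := by
  match l, he with
  | [x], _ =>
    have := hall x (by simp); simp [this]
  | x :: y :: t, _ =>
    exfalso
    have hx := hall x (by simp)
    have hy := hall y (by simp)
    rcases List.nodup_cons.mp hnd with ⟨hnx, _⟩
    exact hnx (by simp [hx, hy])

-- count-one ↔ no other proposer (on a Nodup board)
theorem pvCountOneIff (s : List (Int × Int)) (P : Int × Int → Option (Int × Int))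
    (t e : Int × Int) (hnd : s.Nodup) (he : e ∈ s) (hpe : P e = some t) :
    ((s.filter (fun x => P x == some t)).length = 1
      ↔ ¬ ∃ e2 ∈ s, e2 ≠ e ∧ P e2 = some t) := by
  have hef : e ∈ s.filter (fun x => P x == some t) :=
    List.mem_filter.mpr ⟨he, by simp [hpe]⟩
  have hndf : (s.filter (fun x => P x == some t)).Nodup := hnd.filter _
  constructor
  · intro h1
    obtain ⟨a, ha⟩ := List.length_eq_one_iff.mp h1
    rintro ⟨e2, he2, hne, hp2⟩
    have h2 : e2 ∈ s.filter (fun x => P x == some t) :=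
      List.mem_filter.mpr ⟨he2, by simp [hp2]⟩
    rw [ha] at hef h2
    simp at hef h2
    exact hne (h2.trans hef.symm)
  · intro h
    have hall : ∀ x ∈ s.filter (fun x => P x == some t), x = e := by
      intro x hx
      rcases List.mem_filter.mp hx with ⟨hxs, hxp⟩
      by_contra hne
      exact h ⟨x, hxs, hne, by simpa using hxp⟩
    rw [pvNodupAllEq _ hndf e hef hall]
    rfl

-- pvBChoice on the two shapes
theorem pvBChoiceNone (props : List ((Int × Int) × Option (Int × Int))) (e : Int × Int) :
    pvBChoice props (e, none) = e := rfl

theorem pvBChoiceSome (props : List ((Int × Int) × Option (Int × Int))) (e t : Int × Int) :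
    pvBChoice props (e, some t)
      = if props.any (fun q => q.1 != e && q.2 == some t) then e else t := rfl

-- extrema only depend on the multiset
theorem pvMaxGetDPerm {l1 l2 : List Int} (h : l1.Perm l2) :
    (PySem.List.max? l1 (fun v => v)).getD 0 = (PySem.List.max? l2 (fun v => v)).getD 0 := by
  cases h1 : PySem.List.max? l1 (fun v => v) with
  | none =>
    have h1' : l1 = [] := (PySem.List.max?_eq_none_iff _ _).mp h1
    subst h1'
    have h2' : l2 = [] := h.nil_eq.symm
    subst h2'; rfl
  | some m1 =>
    cases h2 : PySem.List.max? l2 (fun v => v) with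
    | none =>
      have h2' : l2 = [] := (PySem.List.max?_eq_none_iff _ _).mp h2
      subst h2'
      obtain rfl : l1 = [] := List.perm_nil.mp h
      simp [PySem.List.max?] at h1
    | some m2 =>
      have hm1 := PySem.List.max?_mem h1
      have hm2 := PySem.List.max?_mem h2
      have hle1 := PySem.List.max?_isMax h1 m2 (h.mem_iff.mpr hm2)
      have hle2 := PySem.List.max?_isMax h2 m1 (h.mem_iff.mp hm1)
      simp at hle1 hle2 ⊢; omega

theorem pvMinGetDPerm {l1 l2 : List Int} (h : l1.Perm l2) :
    (PySem.List.min? l1 (fun v => v)).getD 0 = (PySem.List.min? l2 (fun v => v)).getD 0 := by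
  cases h1 : PySem.List.min? l1 (fun v => v) with
  | none =>
    have h1' : l1 = [] := (PySem.List.min?_eq_none_iff _ _).mp h1
    subst h1'
    have h2' : l2 = [] := h.nil_eq.symm
    subst h2'; rfl
  | some m1 =>
    cases h2 : PySem.List.min? l2 (fun v => v) with
    | none =>
      have h2' : l2 = [] := (PySem.List.min?_eq_none_iff _ _).mp h2
      subst h2'
      obtain rfl : l1 = [] := List.perm_nil.mp h
      simp [PySem.List.min?] at h1
    | some m2 =>
      have hm1 := PySem.List.min?_mem h1
      have hm2 := PySem.List.min?_mem h2
      have hle1 := PySem.List.min?_isMin h1 m2 (h.mem_iff.mpr hm2)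
      have hle2 := PySem.List.min?_isMin h2 m1 (h.mem_iff.mp hm1)
      simp at hle1 hle2 ⊢; omega

-- the main per-fuel induction
theorem pvLoopEq (fuel : Nat) : ∀ (s1 s2 : List (Int × Int)) (r : Int),
    s1.Nodup → s1.Perm s2 → pvALoop s1 r fuel = pvBLoop s2 r fuel := by
  induction fuel with
  | zero =>
    intro s1 s2 r hnd hp
    simp only [pvALoop, pvBLoop]
    rw [pvMaxGetDPerm (hp.map _), pvMinGetDPerm (hp.map _),
        pvMaxGetDPerm (hp.map _), pvMinGetDPerm (hp.map _), hp.length_eq]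
  | succ fuel ih =>
    intro s1 s2 r hnd hp
    have hnd2 : s2.Nodup := hp.nodup_iff.mp hnd
    have hPP : ∀ e, pvBPropose s1 r e = pvBPropose s2 r e := fun e => pvBProposePerm hp r e
    show pvALoop s1 r (fuel + 1) = pvBLoop s2 r (fuel + 1)
    rw [pvALoop, pvBLoop, pvARoundEq s1 r hnd]
    dsimp only
    have hgetD : ∀ c, ((List.filterMap (fun e => Option.map (fun t => (t, e)) (pvBPropose s1 r e)) s1).foldl
          (fun d p => d.modify p.1 [] (· ++ [p.2])) PySem.Dict.empty).getD c []
          = s1.filter (fun e => pvBPropose s1 r e == some c) := by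
      intro c
      rw [PySem.Dict.getD_foldl_modify_append, pvPairsTFilter]
      simp [PySem.Dict.getD_empty]
    have hkeysmem : ∀ t, (t ∈ ((List.filterMap (fun e => Option.map (fun t => (t, e)) (pvBPropose s1 r e)) s1).foldl
          (fun d p => d.modify p.1 [] (· ++ [p.2])) PySem.Dict.empty).keys)
          ↔ ∃ e ∈ s1, pvBPropose s1 r e = some t := by
      intro t
      rw [PySem.Dict.keys_foldl_modify_key, pvMapFstPairsT]
      simp [PySem.Dict.keys_empty, PySem.Set.mem_update, List.mem_filterMap]
    have hflen : ∀ t, (s1.filter (fun e => pvBPropose s1 r e == some t)).length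
        = (s2.filter (fun e => pvBPropose s2 r e == some t)).length := by
      intro t
      have hcg : s1.filter (fun e => pvBPropose s1 r e == some t)
          = s1.filter (fun e => pvBPropose s2 r e == some t) :=
        List.filter_congr (fun e _ => by rw [hPP])
      rw [hcg, ← List.countP_eq_length_filter, ← List.countP_eq_length_filter, hp.countP_eq]
    have hany : ∀ (e t : Int × Int),
        ((s2.map (fun x => (x, pvBPropose s2 r x))).any (fun q => q.1 != e && q.2 == some t)) = true
          ↔ ∃ e2 ∈ s2, e2 ≠ e ∧ pvBPropose s2 r e2 = some t := by
      intro e t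
      simp [List.any_eq_true]
    have hlenone : ∀ (e t : Int × Int), e ∈ s2 → pvBPropose s2 r e = some t →
        ((s1.filter (fun x => pvBPropose s1 r x == some t)).length = 1
          ↔ ¬ ∃ e2 ∈ s2, e2 ≠ e ∧ pvBPropose s2 r e2 = some t) := by
      intro e t he hpe
      rw [hflen]
      exact pvCountOneIff s2 (pvBPropose s2 r) t e hnd2 he hpe
    have htA : (PySem.Set.len (s1.filter fun e => (pvBPropose s1 r e).isNone) == (s1.length : Int)) = true
        ↔ ∀ e ∈ s1, pvBPropose s1 r e = none := by
      rw [show PySem.Set.len (s1.filter fun e => (pvBPropose s1 r e).isNone)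
            = ((s1.filter fun e => (pvBPropose s1 r e).isNone).length : Int) from rfl]
      rw [beq_iff_eq, Int.natCast_inj, List.length_filter_eq_length_iff]
      simp [Option.isNone_iff_eq_none]
    have htB : ((s2.map (fun e => (e, pvBPropose s2 r e))).all (fun p => p.2.isNone)) = true
        ↔ ∀ e ∈ s2, pvBPropose s2 r e = none := by
      simp [List.all_map, Function.comp, Option.isNone_iff_eq_none]
    by_cases ht : ∀ e ∈ s1, pvBPropose s1 r e = none
    · rw [if_pos (htA.mpr ht), if_pos (htB.mpr (fun e he =>
        (hPP e).symm.trans (ht e (hp.mem_iff.mpr he))))]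
    · have ht2 : ¬ ∀ e ∈ s2, pvBPropose s2 r e = none := by
        intro hcon
        exact ht (fun e he => (hPP e).trans (hcon e (hp.mem_iff.mp he)))
      rw [if_neg (fun hcon => ht (htA.mp hcon)), if_neg (fun hcon => ht2 (htB.mp hcon))]
      have hndA : (List.foldl
          (fun s c =>
            if ((((List.filterMap (fun e => Option.map (fun t => (t, e)) (pvBPropose s1 r e)) s1).foldl
                  (fun d p => d.modify p.1 [] (· ++ [p.2])) PySem.Dict.empty).getD c []).length == 1) = true
            then PySem.Set.add s c
            else List.foldl (fun s e => PySem.Set.add s e) s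
              (((List.filterMap (fun e => Option.map (fun t => (t, e)) (pvBPropose s1 r e)) s1).foldl
                  (fun d p => d.modify p.1 [] (· ++ [p.2])) PySem.Dict.empty).getD c []))
          (List.filter (fun e => (pvBPropose s1 r e).isNone) s1)
          ((List.filterMap (fun e => Option.map (fun t => (t, e)) (pvBPropose s1 r e)) s1).foldl
              (fun d p => d.modify p.1 [] (· ++ [p.2])) PySem.Dict.empty).keys).Nodup :=
        pvNodupResolve _ _ _ (hnd.filter _)
      apply ih _ _ _ hndA
      have hndB : ((s2.map (fun e => (e, pvBPropose s2 r e))).foldl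
          (fun s p => PySem.Set.add s (pvBChoice (s2.map (fun e => (e, pvBPropose s2 r e))) p))
          PySem.Set.empty).Nodup :=
        pvNodupFoldlAdd _ List.nodup_nil
      rw [List.perm_ext_iff_of_nodup hndA hndB]
      intro c
      rw [pvMemResolve]
      have hmemB : (c ∈ (s2.map (fun e => (e, pvBPropose s2 r e))).foldl
          (fun s p => PySem.Set.add s (pvBChoice (s2.map (fun e => (e, pvBPropose s2 r e))) p))
          PySem.Set.empty)
          ↔ ∃ e ∈ s2, c = pvBChoice (s2.map (fun e => (e, pvBPropose s2 r e))) (e, pvBPropose s2 r e) := by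
        rw [PySem.Set.mem_foldl_add]
        simp [PySem.Set.empty, List.mem_map]
      rw [hmemB]
      have hstay : (c ∈ List.filter (fun e => (pvBPropose s1 r e).isNone) s1)
          ↔ c ∈ s2 ∧ pvBPropose s2 r c = none := by
        simp only [List.mem_filter, hPP, hp.mem_iff, Option.isNone_iff_eq_none]
      constructor
      · rintro (hst | ⟨k, hk, hcond⟩)
        · rcases hstay.mp hst with ⟨hcs, hcn⟩
          exact ⟨c, hcs, by rw [hcn, pvBChoiceNone]⟩
        · rw [hkeysmem] at hk
          obtain ⟨e0, he0, hpe0⟩ := hk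
          rw [hgetD] at hcond
          by_cases hl : (s1.filter (fun e => pvBPropose s1 r e == some k)).length = 1
          · have hck : c = k := by simpa [hl] using hcond
            have he02 : e0 ∈ s2 := hp.mem_iff.mp he0
            have hpe02 : pvBPropose s2 r e0 = some k := (hPP e0).symm.trans hpe0
            have hnoc : ¬ ∃ e2 ∈ s2, e2 ≠ e0 ∧ pvBPropose s2 r e2 = some k :=
              (hlenone e0 k he02 hpe02).mp hl
            refine ⟨e0, he02, ?_⟩
            rw [hpe02, pvBChoiceSome,
                if_neg (fun hcon => hnoc ((hany e0 k).mp hcon)), hck]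
          · have hcq : c ∈ s1.filter (fun e => pvBPropose s1 r e == some k) := by
              simpa [hl] using hcond
            rcases List.mem_filter.mp hcq with ⟨hcs1, hcp1⟩
            have hcs2 : c ∈ s2 := hp.mem_iff.mp hcs1
            have hcp2 : pvBPropose s2 r c = some k := (hPP c).symm.trans (by simpa using hcp1)
            have hconf : ∃ e2 ∈ s2, e2 ≠ c ∧ pvBPropose s2 r e2 = some k := by
              by_contra hcon
              exact hl ((hlenone c k hcs2 hcp2).mpr hcon)
            refine ⟨c, hcs2, ?_⟩
            rw [hcp2, pvBChoiceSome, if_pos ((hany c k).mpr hconf)]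
      · rintro ⟨e, he2, hc⟩
        have he1 : e ∈ s1 := hp.mem_iff.mpr he2
        cases hpe : pvBPropose s2 r e with
        | none =>
          rw [hpe, pvBChoiceNone] at hc
          subst hc
          exact Or.inl (hstay.mpr ⟨he2, hpe⟩)
        | some t =>
          have hpe1 : pvBPropose s1 r e = some t := (hPP e).trans hpe
          rw [hpe, pvBChoiceSome] at hc
          right
          refine ⟨t, (hkeysmem t).mpr ⟨e, he1, hpe1⟩, ?_⟩
          rw [hgetD]
          by_cases hcf : ∃ e2 ∈ s2, e2 ≠ e ∧ pvBPropose s2 r e2 = some t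
          · rw [if_pos ((hany e t).mpr hcf)] at hc
            have hl : ¬ (s1.filter (fun x => pvBPropose s1 r x == some t)).length = 1 :=
              fun hcon => ((hlenone e t he2 hpe).mp hcon) hcf
            rw [if_neg hl, hc]
            exact List.mem_filter.mpr ⟨he1, by simp [hpe1]⟩
          · rw [if_neg (fun hcon => hcf ((hany e t).mp hcon))] at hc
            have hl : (s1.filter (fun x => pvBPropose s1 r x == some t)).length = 1 :=
              (hlenone e t he2 hpe).mpr hcf
            rw [if_pos hl]
            exact hc


-- ===== VERDICT (by name: the statement is the Claim_ definition above) =====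
theorem slv_spec : Claim_equal_slv := by
  intro elves rounds _ hpre
  unfold Spec_slv slv slv_alt
  have hof : PySem.Set.ofList elves = elves := PySem.Set.ofList_eq_self_of_nodup elves hpre.1
  rw [hof]
  exact pvLoopEq rounds.toNat elves elves 0 hpre.1 (List.Perm.refl _)
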